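-- pv_equiv track=rewrite | github.com/S-Abolfazl/BFS-DFS-Astar | solver.py | h_calculator
-- ===== SOURCE A (Python) =====
-- def h_calculator(board, start):
--     stone_positions = []
--     box_positions = []
--     x, y = start
--     for i in range(len(board)):
--         for j in range(len(board[i])):
--             if board[i][j] == 's':
--                 stone_positions.append((i, j))
--             elif board[i][j] == 'b':
--                 box_positions.append((i, j))
--
--     sb_distance = 0
--     for stone_pos in stone_positions:
--         for box_pos in box_positions:
--             sb_distance += abs(stone_pos[0] - box_pos[0]) + abs(stone_pos[1] - box_pos[1])
--
--     sa_distance = 0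
--     for stone_pos in stone_positions:
--         sa_distance += abs(stone_pos[0] - x) + abs(stone_pos[1] - y)
--
--     return sb_distance + sa_distance
-- ===== SOURCE B (Python) =====
-- def _cross(stones, boxes):
--     events = sorted([(c, 0) for c in stones] + [(c, 1) for c in boxes],
--                     key=lambda e: e[0])
--     total = 0
--     cnt_s = 0
--     sum_s = 0
--     cnt_b = 0
--     sum_b = 0
--     for c, t in events:
--         if t == 0:
--             total += c * cnt_b - sum_b
--             cnt_s += 1
--             sum_s += c
--         else:
--             total += c * cnt_s - sum_s
--             cnt_b += 1
--             sum_b += c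
--     return total
--
--
-- def h_calculator(board, start):
--     x, y = start
--     sxs = []
--     sys_ = []
--     bxs = []
--     bys = []
--     sa = 0
--     for i, row in enumerate(board):
--         for j, cell in enumerate(row):
--             if cell == 's':
--                 sxs.append(i)
--                 sys_.append(j)
--                 sa += abs(i - x) + abs(j - y)
--             elif cell == 'b':
--                 bxs.append(i)
--                 bys.append(j)
--     return _cross(sxs, bxs) + _cross(sys_, bys) + sa
-- ===== Notes on version B (the rewrite author's own statement) =====
-- stated objective: alternative
-- what changed: Replaces the nested stone-box double loop by a per-axis decomposition: coordinates are tagged, sorted, and a single prefix-count/prefix-sum sweep computes the pairwise Manhattan sum; the start-distance term is fused into the board scan.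
import Mathlib
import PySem

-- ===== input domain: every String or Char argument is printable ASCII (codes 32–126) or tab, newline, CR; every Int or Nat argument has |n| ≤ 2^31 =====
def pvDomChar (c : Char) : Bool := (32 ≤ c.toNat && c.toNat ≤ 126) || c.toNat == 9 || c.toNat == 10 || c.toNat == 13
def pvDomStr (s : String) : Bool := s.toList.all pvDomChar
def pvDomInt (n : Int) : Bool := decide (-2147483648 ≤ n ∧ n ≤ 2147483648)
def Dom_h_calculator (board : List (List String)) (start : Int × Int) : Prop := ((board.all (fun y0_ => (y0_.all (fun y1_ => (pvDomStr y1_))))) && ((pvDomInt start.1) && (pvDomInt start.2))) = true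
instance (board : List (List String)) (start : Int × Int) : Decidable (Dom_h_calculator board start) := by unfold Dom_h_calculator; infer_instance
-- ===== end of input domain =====

-- ===== PORT A =====
-- B replaces A's nested stone-box double loop by a per-axis sort + prefix-sum sweep (same return value; no mutation).
def h_calculator (board : List (List String)) (start : Int × Int) : Int :=
  let x := start.1
  let y := start.2
  let pos := (PySem.List.pyRange 0 (board.length : Int) 1).foldl (fun acc i =>
      let row := PySem.List.pyGetD board i []
      (PySem.List.pyRange 0 (row.length : Int) 1).foldl (fun acc2 j =>
        let cell := PySem.List.pyGetD row j ""
        if cell = "s" then (acc2.1 ++ [(i, j)], acc2.2)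
        else if cell = "b" then (acc2.1, acc2.2 ++ [(i, j)])
        else acc2) acc)
    (([] : List (Int × Int)), ([] : List (Int × Int)))
  let sb_distance := pos.1.foldl (fun d sp =>
      pos.2.foldl (fun d2 bp => d2 + (|sp.1 - bp.1| + |sp.2 - bp.2|)) d) 0
  let sa_distance := pos.1.foldl (fun d sp => d + (|sp.1 - x| + |sp.2 - y|)) 0
  sb_distance + sa_distance

-- ===== PORT B =====
-- loop body of _cross's sweep: state = (total, cnt_s, sum_s, cnt_b, sum_b)
def pvStep (st : Int × Int × Int × Int × Int) (e : Int × Int) : Int × Int × Int × Int × Int :=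
  if e.2 = 0 then
    (st.1 + (e.1 * st.2.2.2.1 - st.2.2.2.2), st.2.1 + 1, st.2.2.1 + e.1, st.2.2.2.1, st.2.2.2.2)
  else
    (st.1 + (e.1 * st.2.1 - st.2.2.1), st.2.1, st.2.2.1, st.2.2.2.1 + 1, st.2.2.2.2 + e.1)

-- _cross(stones, boxes): sort tagged coordinates, one prefix-count/prefix-sum sweep
def pvCross (stones boxes : List Int) : Int :=
  let events := PySem.List.sorted
      (stones.map (fun c => (c, (0 : Int))) ++ boxes.map (fun c => (c, (1 : Int))))
      (fun e => e.1) false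
  (events.foldl pvStep ((0:Int), (0:Int), (0:Int), (0:Int), (0:Int))).1

def h_calculator_alt (board : List (List String)) (start : Int × Int) : Int :=
  let x := start.1
  let y := start.2
  let st := (PySem.List.enumerate board 0).foldl (fun acc ir =>
      (PySem.List.enumerate ir.2 0).foldl (fun a jc =>
        if jc.2 = "s" then
          (a.1 ++ [ir.1], a.2.1 ++ [jc.1], a.2.2.1, a.2.2.2.1,
           a.2.2.2.2 + (|ir.1 - x| + |jc.1 - y|))
        else if jc.2 = "b" then
          (a.1, a.2.1, a.2.2.1 ++ [ir.1], a.2.2.2.1 ++ [jc.1], a.2.2.2.2)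
        else a) acc)
    (([] : List Int), ([] : List Int), ([] : List Int), ([] : List Int), (0 : Int))
  pvCross st.1 st.2.2.1 + pvCross st.2.1 st.2.2.2.1 + st.2.2.2.2

-- ===== PRECONDITION & SPEC =====
def Spec_h_calculator (board : List (List String)) (start : Int × Int) (out : Int) : Prop := out = h_calculator_alt board start
instance (board : List (List String)) (start : Int × Int) (out : Int) : Decidable (Spec_h_calculator board start out) := by unfold Spec_h_calculator; infer_instance

-- ===== CLAIM (what is proved, stated in full; the proofs are below) =====
def Claim_equal_h_calculator : Prop := ∀ (board : List (List String)) (start : Int × Int), Dom_h_calculator board start → Spec_h_calculator board start (h_calculator board start)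

-- ===== LEMMAS AND PROOFS =====

-- cells of the board holding the string ch, as (row, column) pairs
def pvCells (board : List (List String)) (ch : String) : List (Int × Int) :=
  (PySem.List.enumerate board 0).flatMap (fun ir =>
    ((PySem.List.enumerate ir.2 0).filter (fun jc => jc.2 == ch)).map (fun jc => (ir.1, jc.1)))

-- one-axis pairwise absolute-difference sum
def pvCS (a b : List Int) : Int := (a.map (fun p => (b.map (fun q => |p - q|)).sum)).sum

-- coordinates of stone-tagged / box-tagged events
def pvStones (L : List (Int × Int)) : List Int := (L.filter (fun e => e.2 == 0)).map (·.1)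
def pvBoxes (L : List (Int × Int)) : List Int := (L.filter (fun e => !(e.2 == 0))).map (·.1)

theorem pvSumSub (b : List Int) (c : Int) :
    (b.map (fun q => c - q)).sum = b.length * c - b.sum := by
  induction b with
  | nil => simp
  | cons h t ih => simp [ih]; ring

theorem pvCS_append_right (a b : List Int) (q : Int) :
    pvCS a (b ++ [q]) = pvCS a b + (a.map (fun p => |p - q|)).sum := by
  simp [pvCS]

theorem pvCS_append_left (a b : List Int) (p : Int) :
    pvCS (a ++ [p]) b = pvCS a b + (b.map (fun q => |p - q|)).sum := by
  simp [pvCS]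

theorem pvScan (L : List (Int × Int)) (h : L.Pairwise (fun a b => a.1 ≤ b.1)) :
    L.foldl pvStep ((0:Int), (0:Int), (0:Int), (0:Int), (0:Int))
    = (pvCS (pvStones L) (pvBoxes L), ((pvStones L).length : Int), (pvStones L).sum,
       ((pvBoxes L).length : Int), (pvBoxes L).sum) := by
  induction L using List.reverseRecOn with
  | nil => simp [pvCS, pvStones, pvBoxes]
  | append_singleton M e ih =>
    have hp := List.pairwise_append.mp h
    have hM := hp.1
    have hle : ∀ p ∈ M, p.1 ≤ e.1 := fun p hpM => hp.2.2 p hpM e (by simp)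
    rw [List.foldl_append, List.foldl_cons, List.foldl_nil, ih hM]
    by_cases he : e.2 = 0
    · have hstones : pvStones (M ++ [e]) = pvStones M ++ [e.1] := by
        simp [pvStones, he]
      have hboxes : pvBoxes (M ++ [e]) = pvBoxes M := by
        simp [pvBoxes, he]
      have habs : ((pvBoxes M).map (fun q => |e.1 - q|)) = (pvBoxes M).map (fun q => e.1 - q) := by
        apply List.map_congr_left
        intro q hq
        simp only [pvBoxes, List.mem_map, List.mem_filter] at hq
        obtain ⟨p, ⟨hpM, _⟩, rfl⟩ := hq
        exact abs_of_nonneg (by have := hle p hpM; omega)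
      simp only [pvStep, he]
      rw [hstones, hboxes, pvCS_append_left, habs, pvSumSub]
      simp [pvStones]
      ring
    · have hstones : pvStones (M ++ [e]) = pvStones M := by
        simp [pvStones, he]
      have hboxes : pvBoxes (M ++ [e]) = pvBoxes M ++ [e.1] := by
        simp [pvBoxes, he]
      have habs : ((pvStones M).map (fun p => |p - e.1|)) = (pvStones M).map (fun p => e.1 - p) := by
        apply List.map_congr_left
        intro q hq
        simp only [pvStones, List.mem_map, List.mem_filter] at hq
        obtain ⟨p, ⟨hpM, _⟩, rfl⟩ := hq
        rw [abs_sub_comm]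
        exact abs_of_nonneg (by have := hle p hpM; omega)
      simp only [pvStep, he]
      rw [hstones, hboxes, pvCS_append_right, habs, pvSumSub]
      simp [pvBoxes]
      ring

theorem pvCS_perm {a a' b b' : List Int} (ha : a.Perm a') (hb : b.Perm b') :
    pvCS a b = pvCS a' b' := by
  unfold pvCS
  have hin : ∀ p : Int, ((b.map (fun q => |p - q|)).sum) = ((b'.map (fun q => |p - q|)).sum) :=
    fun p => (hb.map _).sum_eq
  calc (a.map (fun p => (b.map (fun q => |p - q|)).sum)).sum
      = (a.map (fun p => (b'.map (fun q => |p - q|)).sum)).sum := by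
        rw [List.map_congr_left (fun p _ => hin p)]
    _ = (a'.map (fun p => (b'.map (fun q => |p - q|)).sum)).sum := (ha.map _).sum_eq

theorem pvCross_eq (a b : List Int) : pvCross a b = pvCS a b := by
  unfold pvCross
  set ev := a.map (fun c => (c, (0:Int))) ++ b.map (fun c => (c, (1:Int))) with hev
  have hsorted := PySem.List.sorted_pairwise ev (fun e => e.1)
  show (List.foldl pvStep ((0:Int),(0:Int),(0:Int),(0:Int),(0:Int)) (PySem.List.sorted ev (fun e => e.1) false)).1 = pvCS a b
  rw [pvScan _ hsorted]
  have hperm : (PySem.List.sorted ev (fun e => e.1) false).Perm ev :=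
    PySem.List.sorted_perm ev (fun e => e.1) false
  have hS : (pvStones (PySem.List.sorted ev (fun e => e.1) false)).Perm (pvStones ev) :=
    (hperm.filter _).map _
  have hB : (pvBoxes (PySem.List.sorted ev (fun e => e.1) false)).Perm (pvBoxes ev) :=
    (hperm.filter _).map _
  have hSev : pvStones ev = a := by
    simp [pvStones, hev, List.filter_append, List.filter_map, Function.comp_def, List.map_map]
  have hBev : pvBoxes ev = b := by
    simp [pvBoxes, hev, List.filter_append, List.filter_map, Function.comp_def, List.map_map]
  exact pvCS_perm (hSev ▸ hS) (hBev ▸ hB)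

theorem pvAxisSplit (S B : List (Int × Int)) :
    (S.map (fun s => (B.map (fun b => |s.1 - b.1| + |s.2 - b.2|)).sum)).sum
    = pvCS (S.map (·.1)) (B.map (·.1)) + pvCS (S.map (·.2)) (B.map (·.2)) := by
  unfold pvCS
  simp only [List.map_map, Function.comp_def]
  rw [← PySem.List.sum_map_add_int]
  apply congrArg
  apply List.map_congr_left
  intro s _
  rw [← PySem.List.sum_map_add_int]

theorem pvInnerA (es : List (Int × String)) (i : Int)
    (acc : List (Int × Int) × List (Int × Int)) :
    es.foldl (fun acc2 jc =>
        if jc.2 = "s" then (acc2.1 ++ [(i, jc.1)], acc2.2)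
        else if jc.2 = "b" then (acc2.1, acc2.2 ++ [(i, jc.1)]) else acc2) acc
    = (acc.1 ++ (es.filter (fun jc => jc.2 == "s")).map (fun jc => (i, jc.1)),
       acc.2 ++ (es.filter (fun jc => jc.2 == "b")).map (fun jc => (i, jc.1))) := by
  induction es generalizing acc with
  | nil => simp
  | cons h t ih =>
    by_cases hs : h.2 = "s"
    · have hb : ¬ h.2 = "b" := by simp [hs]
      simp [List.foldl_cons, hs, ih]
    · by_cases hb : h.2 = "b"
      · simp [List.foldl_cons, hb, ih]
      · simp [List.foldl_cons, hs, hb, ih]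

theorem pvPairFold {α : Type} (l : List α) (f g : α → List (Int × Int))
    (acc : List (Int × Int) × List (Int × Int)) :
    l.foldl (fun a e => (a.1 ++ f e, a.2 ++ g e)) acc
    = (acc.1 ++ l.flatMap f, acc.2 ++ l.flatMap g) := by
  induction l generalizing acc with
  | nil => simp
  | cons h t ih => simp [ih]

theorem pvACollect (board : List (List String)) :
    ((PySem.List.pyRange 0 (board.length : Int) 1).foldl (fun acc i =>
      let row := PySem.List.pyGetD board i []
      (PySem.List.pyRange 0 (row.length : Int) 1).foldl (fun acc2 j =>
        let cell := PySem.List.pyGetD row j ""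
        if cell = "s" then (acc2.1 ++ [(i, j)], acc2.2)
        else if cell = "b" then (acc2.1, acc2.2 ++ [(i, j)])
        else acc2) acc)
      (([] : List (Int × Int)), ([] : List (Int × Int))))
    = (pvCells board "s", pvCells board "b") := by
  have houter : (PySem.List.enumerate board 0) =
      (PySem.List.pyRange 0 (board.length : Int) 1).map
        (fun j => (j, PySem.List.pyGetD board j [])) := by
    simpa using PySem.List.enumerate_eq_map_pyRange (xs := board) (d := [])
  have hstep : ∀ (acc : List (Int × Int) × List (Int × Int)) (ir : Int × List String),
      (PySem.List.pyRange 0 ((ir.2).length : Int) 1).foldl (fun acc2 j =>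
        let cell := PySem.List.pyGetD ir.2 j ""
        if cell = "s" then (acc2.1 ++ [(ir.1, j)], acc2.2)
        else if cell = "b" then (acc2.1, acc2.2 ++ [(ir.1, j)])
        else acc2) acc
      = (acc.1 ++ ((PySem.List.enumerate ir.2 0).filter (fun jc => jc.2 == "s")).map (fun jc => (ir.1, jc.1)),
         acc.2 ++ ((PySem.List.enumerate ir.2 0).filter (fun jc => jc.2 == "b")).map (fun jc => (ir.1, jc.1))) := by
    intro acc ir
    have hin : (PySem.List.enumerate ir.2 0) =
        (PySem.List.pyRange 0 ((ir.2).length : Int) 1).map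
          (fun j => (j, PySem.List.pyGetD ir.2 j "")) := by
      simpa using PySem.List.enumerate_eq_map_pyRange (xs := ir.2) (d := "")
    rw [← pvInnerA (PySem.List.enumerate ir.2 0) ir.1 acc, hin, List.foldl_map]
  calc ((PySem.List.pyRange 0 (board.length : Int) 1).foldl (fun acc i =>
      let row := PySem.List.pyGetD board i []
      (PySem.List.pyRange 0 (row.length : Int) 1).foldl (fun acc2 j =>
        let cell := PySem.List.pyGetD row j ""
        if cell = "s" then (acc2.1 ++ [(i, j)], acc2.2)
        else if cell = "b" then (acc2.1, acc2.2 ++ [(i, j)])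
        else acc2) acc)
      (([] : List (Int × Int)), ([] : List (Int × Int))))
      = (PySem.List.enumerate board 0).foldl (fun acc ir =>
          (PySem.List.pyRange 0 ((ir.2).length : Int) 1).foldl (fun acc2 j =>
            let cell := PySem.List.pyGetD ir.2 j ""
            if cell = "s" then (acc2.1 ++ [(ir.1, j)], acc2.2)
            else if cell = "b" then (acc2.1, acc2.2 ++ [(ir.1, j)])
            else acc2) acc) (([] : List (Int × Int)), ([] : List (Int × Int))) := by
        rw [houter, List.foldl_map]
    _ = (PySem.List.enumerate board 0).foldl (fun acc ir =>
          (acc.1 ++ ((PySem.List.enumerate ir.2 0).filter (fun jc => jc.2 == "s")).map (fun jc => (ir.1, jc.1)),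
           acc.2 ++ ((PySem.List.enumerate ir.2 0).filter (fun jc => jc.2 == "b")).map (fun jc => (ir.1, jc.1))))
          (([] : List (Int × Int)), ([] : List (Int × Int))) := by
        exact PySem.List.foldl_congr_mem _ _ _ _ (fun acc ir _ => hstep acc ir)
    _ = (pvCells board "s", pvCells board "b") := by
        rw [pvPairFold]; simp [pvCells]

theorem pvInnerB (es : List (Int × String)) (i x y : Int)
    (a : List Int × List Int × List Int × List Int × Int) :
    es.foldl (fun a jc =>
        if jc.2 = "s" then
          (a.1 ++ [i], a.2.1 ++ [jc.1], a.2.2.1, a.2.2.2.1,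
           a.2.2.2.2 + (|i - x| + |jc.1 - y|))
        else if jc.2 = "b" then
          (a.1, a.2.1, a.2.2.1 ++ [i], a.2.2.2.1 ++ [jc.1], a.2.2.2.2)
        else a) a
    = (a.1 ++ (es.filter (fun jc => jc.2 == "s")).map (fun _ => i),
       a.2.1 ++ (es.filter (fun jc => jc.2 == "s")).map (·.1),
       a.2.2.1 ++ (es.filter (fun jc => jc.2 == "b")).map (fun _ => i),
       a.2.2.2.1 ++ (es.filter (fun jc => jc.2 == "b")).map (·.1),
       a.2.2.2.2 + ((es.filter (fun jc => jc.2 == "s")).map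
          (fun jc => |i - x| + |jc.1 - y|)).sum) := by
  induction es generalizing a with
  | nil => simp
  | cons h t ih =>
    by_cases hs : h.2 = "s"
    · have hb : ¬ h.2 = "b" := by simp [hs]
      simp [List.foldl_cons, hs, ih]; ring
    · by_cases hb : h.2 = "b"
      · simp [List.foldl_cons, hb, ih]
      · simp [List.foldl_cons, hs, hb, ih]

theorem pvFold5 {α : Type} (l : List α) (f1 f2 f3 f4 : α → List Int) (g : α → Int)
    (acc : List Int × List Int × List Int × List Int × Int) :
    l.foldl (fun a e => (a.1 ++ f1 e, a.2.1 ++ f2 e, a.2.2.1 ++ f3 e, a.2.2.2.1 ++ f4 e,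
        a.2.2.2.2 + g e)) acc
    = (acc.1 ++ l.flatMap f1, acc.2.1 ++ l.flatMap f2, acc.2.2.1 ++ l.flatMap f3,
       acc.2.2.2.1 ++ l.flatMap f4, acc.2.2.2.2 + (l.map g).sum) := by
  induction l generalizing acc with
  | nil => simp
  | cons h t ih => simp [ih]; ring

theorem pvSumFlatMap {α : Type} (l : List α) (f : α → List Int) :
    (l.flatMap f).sum = (l.map (fun a => (f a).sum)).sum := by
  induction l with
  | nil => rfl
  | cons h t ih => simp [ih]

theorem pvBCollect (board : List (List String)) (x y : Int) :
    ((PySem.List.enumerate board 0).foldl (fun acc ir =>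
      (PySem.List.enumerate ir.2 0).foldl (fun a jc =>
        if jc.2 = "s" then
          (a.1 ++ [ir.1], a.2.1 ++ [jc.1], a.2.2.1, a.2.2.2.1,
           a.2.2.2.2 + (|ir.1 - x| + |jc.1 - y|))
        else if jc.2 = "b" then
          (a.1, a.2.1, a.2.2.1 ++ [ir.1], a.2.2.2.1 ++ [jc.1], a.2.2.2.2)
        else a) acc)
      (([] : List Int), ([] : List Int), ([] : List Int), ([] : List Int), (0 : Int)))
    = ((pvCells board "s").map (·.1), (pvCells board "s").map (·.2),
       (pvCells board "b").map (·.1), (pvCells board "b").map (·.2),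
       ((pvCells board "s").map (fun s => |s.1 - x| + |s.2 - y|)).sum) := by
  rw [PySem.List.foldl_congr_mem _ _
      (fun acc ir => (acc.1 ++ ((PySem.List.enumerate ir.2 0).filter (fun jc => jc.2 == "s")).map (fun _ => ir.1),
        acc.2.1 ++ ((PySem.List.enumerate ir.2 0).filter (fun jc => jc.2 == "s")).map (·.1),
        acc.2.2.1 ++ ((PySem.List.enumerate ir.2 0).filter (fun jc => jc.2 == "b")).map (fun _ => ir.1),
        acc.2.2.2.1 ++ ((PySem.List.enumerate ir.2 0).filter (fun jc => jc.2 == "b")).map (·.1),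
        acc.2.2.2.2 + (((PySem.List.enumerate ir.2 0).filter (fun jc => jc.2 == "s")).map
          (fun jc => |ir.1 - x| + |jc.1 - y|)).sum))
      _ (fun acc ir _ => pvInnerB (PySem.List.enumerate ir.2 0) ir.1 x y acc),
    pvFold5]
  refine Prod.ext ?_ (Prod.ext ?_ (Prod.ext ?_ (Prod.ext ?_ ?_))) <;>
    simp [pvCells, List.map_flatMap, List.map_map, Function.comp_def, pvSumFlatMap]


-- ===== VERDICT (by name: the statement is the Claim_ definition above) =====
theorem h_calculator_spec : Claim_equal_h_calculator := by
  intro board start _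
  unfold Spec_h_calculator h_calculator h_calculator_alt
  simp only []
  rw [pvACollect, pvBCollect]
  dsimp only
  rw [pvCross_eq, pvCross_eq]
  rw [PySem.List.foldl_congr_mem (pvCells board "s") _
      (fun d sp => d + ((pvCells board "b").map (fun bp => |sp.1 - bp.1| + |sp.2 - bp.2|)).sum) 0
      (fun d sp _ => PySem.List.foldl_add (pvCells board "b") _ d)]
  rw [PySem.List.foldl_add, PySem.List.foldl_add]
  rw [pvAxisSplit]
  ring
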